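-- pv_equiv track=rewrite | github.com/alexandraback/datacollection | solutions_5706278382862336_1/Python/lliquid/A.py | func
-- ===== SOURCE A (Python) =====
-- import math
--
-- def gcd(a, b):
--     if b == 0:
--         return a
--     else:
--         return gcd(b, a % b)
--
-- def func(p, q):
--     m = gcd(p, q)
--     p, q = int(p / m), int(q / m)
--     if int(math.pow(2, int(math.log2(q)))) != q:
--         return -1
--     ans = 0
--     while (q >> 1) > 0:
--         if p >= q:
--             break
--         else:
--             ans += 1
--         q = (q >> 1)
--     return ans
-- ===== SOURCE B (Python) =====
-- import math
--
--
-- def func(p, q):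
--     g = math.gcd(p, q)
--     s = -1 if q < 0 else 1
--     p, q = s * (p // g), s * (q // g)
--     if q <= 0 or q != 1 << (q.bit_length() - 1):
--         return -1
--     k = q.bit_length() - 1
--     return k if p <= 0 else max(0, k - p.bit_length() + 1)
-- ===== Notes on version B (the rewrite author's own statement) =====
-- stated objective: simpler
-- what changed: B replaces A's repeated-halving while-loop with a closed-form bit_length formula, A's float log2/pow power-of-two test with an integer shift test, and A's hand-written recursive gcd with math.gcd plus an explicit denominator-sign normalization.
import Mathlib
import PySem

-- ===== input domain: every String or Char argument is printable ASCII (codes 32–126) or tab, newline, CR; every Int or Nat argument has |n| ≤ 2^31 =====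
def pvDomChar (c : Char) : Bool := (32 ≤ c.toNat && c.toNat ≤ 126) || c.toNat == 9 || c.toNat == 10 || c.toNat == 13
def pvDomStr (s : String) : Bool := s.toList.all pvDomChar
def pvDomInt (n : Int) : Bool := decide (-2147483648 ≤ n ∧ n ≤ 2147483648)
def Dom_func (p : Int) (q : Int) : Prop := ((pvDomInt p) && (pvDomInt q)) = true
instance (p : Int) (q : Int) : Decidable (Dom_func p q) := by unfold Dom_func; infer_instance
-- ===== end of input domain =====

-- B replaces A's halving loop with a closed bit-length formula and the log2/pow
-- power-of-two test with a shift test (objective: simpler); equal on all q ≠ 0.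

-- ===== PORT A =====
-- recursive gcd of A (Python '%' is PySem.Int.mod: sign of the divisor)
def pyGcdA (a b : Int) : Int :=
  if b = 0 then a else pyGcdA b (PySem.Int.mod a b)
termination_by b.natAbs
decreasing_by
  rcases lt_trichotomy b 0 with hb | hb | hb
  · have := PySem.Int.mod_neg_bounds a hb; omega
  · omega
  · have h1 := PySem.Int.mod_nonneg a hb; have h2 := PySem.Int.mod_lt a hb; omega

-- the while loop of A; 'q >> 1' is Lean's 'q >>> 1' (floor shift, Python-exact)
def loopA (p q ans : Int) : Int :=
  if q >>> (1 : Nat) > 0 then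
    if p ≥ q then ans else loopA p (q >>> (1 : Nat)) (ans + 1)
  else ans
termination_by q.toNat
decreasing_by
  rename_i h _
  rw [Int.shiftRight_eq_div_pow] at h ⊢
  norm_num at h ⊢
  omega

def func (p : Int) (q : Int) : Int :=
  let m := pyGcdA p q
  if m = 0 then 0  -- p = q = 0: Python raises ZeroDivisionError; outside Pre_func
  else
    -- int(p / m): m divides p and |p| ≤ 2^31 ≤ 2^53, so the float quotient is the
    -- exact integer quotient; ported as exact integer division
    let p' := p / m
    let q' := q / m
    if q' ≤ 0 then -1  -- math.log2 raises ValueError; unreachable when q ≠ 0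
    else
      -- int(math.pow(2, int(math.log2(q)))): exact for 0 < q ≤ 2^31 (floats are
      -- exact at these magnitudes), equals 2 ^ floor(log2 q)
      if (2 : Int) ^ (Nat.log 2 q'.toNat) ≠ q' then -1
      else loopA p' q' 0

-- ===== PORT B =====
def func_alt (p : Int) (q : Int) : Int :=
  let g : Int := (Int.gcd p q : Int)  -- math.gcd, always ≥ 0
  -- on p = q = 0 Source B raises ZeroDivisionError (p // 0); outside Pre_func
  let s : Int := if q < 0 then -1 else 1
  let p' := s * PySem.Int.floordiv p g
  let q' := s * PySem.Int.floordiv q g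
  if q' ≤ 0 ∨ q' ≠ (1 : Int) <<< (PySem.Int.bitLength q' - 1) then -1
  else
    let k : Int := (PySem.Int.bitLength q' : Int) - 1
    if p' ≤ 0 then k else max 0 (k - (PySem.Int.bitLength p' : Int) + 1)

-- ===== PRECONDITION & SPEC =====
-- Pre_ excludes q = 0, on which A always raises (ZeroDivisionError if p = 0, else
-- ValueError from math.log2(0)).
def Pre_func (p : Int) (q : Int) : Prop := q ≠ 0
instance (p : Int) (q : Int) : Decidable (Pre_func p q) := by unfold Pre_func; infer_instance
def pvWitness_func : Int × Int := (3, 4)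

def Spec_func (p : Int) (q : Int) (out : Int) : Prop := out = func_alt p q
instance (p : Int) (q : Int) (out : Int) : Decidable (Spec_func p q out) := by unfold Spec_func; infer_instance

-- ===== CLAIM (what is proved, stated in full; the proofs are below) =====
def Claim_equal_func : Prop := ∀ (p : Int) (q : Int), Dom_func p q → Pre_func p q → Spec_func p q (func p q)

-- ===== LEMMAS AND PROOFS =====

-- the Python gcd divides both arguments and has the sign of its second argument
theorem pyGcdA_props (a b : Int) (hb : b ≠ 0) :
    pyGcdA a b ∣ a ∧ pyGcdA a b ∣ b ∧ (0 < pyGcdA a b ↔ 0 < b) := by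
  induction a, b using pyGcdA.induct with
  | case1 a => exact absurd rfl hb
  | case2 a b h ih =>
    rw [pyGcdA]; simp only [h, if_false]
    by_cases hm : PySem.Int.mod a b = 0
    · rw [hm, pyGcdA]; simp only [if_pos (Eq.refl (0:Int))]
      exact ⟨(PySem.Int.mod_eq_zero_iff_dvd a b).mp hm, dvd_refl b, Iff.rfl⟩
    · obtain ⟨d1, d2, hs⟩ := ih hm
      refine ⟨?_, d1, ?_, ?_⟩
      · have hd : pyGcdA b (PySem.Int.mod a b) ∣
            PySem.Int.floordiv a b * b + PySem.Int.mod a b :=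
          dvd_add (d1.mul_left _) d2
        rwa [PySem.Int.floordiv_mul_add_mod] at hd
      · intro hg
        by_contra hble
        push_neg at hble
        have hblt : b < 0 := lt_of_le_of_ne hble h
        have hbnd := PySem.Int.mod_neg_bounds a hblt
        have := hs.mp hg
        omega
      · intro hbpos
        have h1 := PySem.Int.mod_nonneg a hbpos
        exact hs.mpr (by omega)

-- every common divisor of the arguments divides the Python gcd
theorem pyGcdA_common_dvd (a b d : Int) (ha : d ∣ a) (hb : d ∣ b) : d ∣ pyGcdA a b := by
  induction a, b using pyGcdA.induct with
  | case1 a => rw [pyGcdA]; simpa using ha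
  | case2 a b h ih =>
    rw [pyGcdA]; simp only [h, if_false]
    refine ih hb ?_
    have hm : PySem.Int.mod a b = a - PySem.Int.floordiv a b * b := by
      have := PySem.Int.floordiv_mul_add_mod a b
      omega
    rw [hm]
    exact dvd_sub ha (hb.mul_left _)

-- the magnitude of the Python gcd is Int.gcd
theorem natAbs_pyGcdA (a b : Int) : (pyGcdA a b).natAbs = Int.gcd a b := by
  rcases eq_or_ne b 0 with hb | hb
  · subst hb
    rw [pyGcdA]
    simp [Int.gcd]
  · obtain ⟨d1, d2, _⟩ := pyGcdA_props a b hb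
    refine Nat.dvd_antisymm ?_ ?_
    · have hdg : pyGcdA a b ∣ ((Int.gcd a b : Nat) : Int) :=
        Int.natAbs_dvd.mp (Int.natCast_dvd_natCast.mpr
          (Nat.dvd_gcd (Int.natAbs_dvd_natAbs.mpr d1) (Int.natAbs_dvd_natAbs.mpr d2)))
      simpa using Int.natAbs_dvd_natAbs.mpr hdg
    · have hgd : ((Int.gcd a b : Nat) : Int) ∣ pyGcdA a b :=
        pyGcdA_common_dvd a b _ (Int.gcd_dvd_left a b) (Int.gcd_dvd_right a b)
      simpa using Int.natAbs_dvd_natAbs.mpr hgd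

-- bit length of a power of two
theorem bitLength_two_pow (j : Nat) : PySem.Int.bitLength ((2 : Int) ^ j) = j + 1 := by
  have habs : ((2 : Int) ^ j).natAbs = 2 ^ j := by
    rw [Int.natAbs_pow]; rfl
  have h1 := PySem.Int.lt_two_pow_bitLength ((2 : Int) ^ j)
  have h2 := PySem.Int.two_pow_bitLength_le ((2 : Int) ^ j) (by positivity)
  rw [habs] at h1 h2
  have hj : j < PySem.Int.bitLength ((2 : Int) ^ j) :=
    (Nat.pow_lt_pow_iff_right one_lt_two).mp h1
  have hj2 : PySem.Int.bitLength ((2 : Int) ^ j) - 1 ≤ j :=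
    (Nat.pow_le_pow_iff_right one_lt_two).mp h2
  omega

-- a positive integer has positive bit length
theorem bitLength_pos (n : Int) (hn : n ≠ 0) : 1 ≤ PySem.Int.bitLength n := by
  by_contra hb
  push_neg at hb
  have hb0 : PySem.Int.bitLength n = 0 := by omega
  have h1 := PySem.Int.lt_two_pow_bitLength n
  rw [hb0] at h1
  norm_num at h1
  exact hn (by omega)

-- A's power-of-two test (2 ^ int(log2 q) == q) agrees with B's shift test
theorem pow_check (n : Int) (hn : 0 < n) :
    ((2 : Int) ^ (Nat.log 2 n.toNat) = n) ↔ (n = (1 : Int) <<< (PySem.Int.bitLength n - 1)) := by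
  constructor
  · intro h
    rw [Int.shiftLeft_eq, one_mul, ← h, bitLength_two_pow, Nat.add_sub_cancel]
  · intro h
    rw [Int.shiftLeft_eq, one_mul] at h
    set j := PySem.Int.bitLength n - 1 with hj
    have hcast : ((2 : Int) ^ j) = ((2 ^ j : Nat) : Int) := by push_cast; rfl
    have htn : n.toNat = 2 ^ j := by rw [h, hcast, Int.toNat_natCast]
    rw [htn, Nat.log_pow one_lt_two]
    exact h.symm

-- the closed form for A's halving loop on a power of two
theorem loopA_closed (k : Nat) (p a : Int) :
    loopA p ((2 : Int) ^ k) a =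
      a + (if p ≤ 0 then (k : Int)
           else max 0 ((k : Int) - (PySem.Int.bitLength p : Int) + 1)) := by
  induction k generalizing a with
  | zero =>
    rw [pow_zero, loopA]
    norm_num [Int.shiftRight_eq_div_pow]
    intro hp0
    exact bitLength_pos p (by omega)
  | succ k ih =>
    have hshift : ((2 : Int) ^ (k + 1)) >>> (1 : Nat) = (2 : Int) ^ k := by
      rw [Int.shiftRight_eq_div_pow, pow_succ]
      norm_num
    rw [loopA, hshift]
    have hpos : (0 : Int) < 2 ^ k := by positivity
    rw [if_pos hpos]
    by_cases hge : p ≥ (2 : Int) ^ (k + 1)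
    · rw [if_pos hge]
      have hp0 : ¬ p ≤ 0 := by
        have : (0:Int) < 2 ^ (k+1) := by positivity
        omega
      rw [if_neg hp0]
      -- p ≥ 2^(k+1) forces bit length ≥ k + 2
      have h1 := PySem.Int.lt_two_pow_bitLength p
      have habs : 2 ^ (k + 1) ≤ p.natAbs := by
        have : ((2:Int) ^ (k+1)) = ((2 ^ (k+1) : Nat) : Int) := by push_cast; rfl
        rw [this] at hge
        omega
      have hbl : k + 1 < PySem.Int.bitLength p :=
        (Nat.pow_lt_pow_iff_right one_lt_two).mp (lt_of_le_of_lt habs h1)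
      have : (k : Int) + 1 - (PySem.Int.bitLength p : Int) + 1 ≤ 0 := by
        push_cast; omega
      omega
    · rw [if_neg hge, ih]
      have hlt : p < (2 : Int) ^ (k + 1) := by omega
      by_cases hp : p ≤ 0
      · simp only [if_pos hp]; push_cast; ring
      · simp only [if_neg hp]
        have h2 := PySem.Int.two_pow_bitLength_le p (by omega)
        have hbl1 := bitLength_pos p (by omega)
        have habs : p.natAbs < 2 ^ (k + 1) := by
          have : ((2:Int) ^ (k+1)) = ((2 ^ (k+1) : Nat) : Int) := by push_cast; rfl
          rw [this] at hlt
          omega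
        have hble : PySem.Int.bitLength p - 1 < k + 1 := by
          by_contra hc
          push_neg at hc
          have := Nat.pow_le_pow_right (by norm_num : 1 ≤ 2) hc
          omega
        have hble' : PySem.Int.bitLength p ≤ k + 1 := by omega
        have : ((PySem.Int.bitLength p : Int)) ≤ (k : Int) + 1 := by exact_mod_cast hble'
        have h1' : (1 : Int) ≤ (PySem.Int.bitLength p : Int) := by exact_mod_cast hbl1
        push_cast
        omega

-- main equivalence
theorem func_eq_alt (p q : Int) (hq : q ≠ 0) : func p q = func_alt p q := by
  unfold func func_alt
  obtain ⟨d1, d2, hsign⟩ := pyGcdA_props p q hq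
  set m := pyGcdA p q with hmdef
  have hm0 : m ≠ 0 := by
    intro h
    rw [h] at d2
    exact hq (zero_dvd_iff.mp d2)
  have habs : (m.natAbs : Int) = ((Int.gcd p q : Nat) : Int) := by
    rw [hmdef]
    exact_mod_cast natAbs_pyGcdA p q
  have hgpos : (0 : Int) < ((Int.gcd p q : Nat) : Int) := by omega
  have hfd_p : PySem.Int.floordiv p ((Int.gcd p q : Nat) : Int) = p / ((Int.gcd p q : Nat) : Int) :=
    PySem.Int.floordiv_eq_ediv_of_pos hgpos
  have hfd_q : PySem.Int.floordiv q ((Int.gcd p q : Nat) : Int) = q / ((Int.gcd p q : Nat) : Int) :=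
    PySem.Int.floordiv_eq_ediv_of_pos hgpos
  have e_pq : ∀ x : Int,
      (if q < 0 then (-1 : Int) else 1) * (x / ((Int.gcd p q : Nat) : Int)) = x / m := by
    intro x
    by_cases hqneg : q < 0
    · have hm : m = -((Int.gcd p q : Nat) : Int) := by
        have : ¬ 0 < m := fun h => absurd (hsign.mp h) (by omega)
        omega
      rw [if_pos hqneg, hm, Int.ediv_neg]
      ring
    · have hm : m = ((Int.gcd p q : Nat) : Int) := by
        have : 0 < m := hsign.mpr (by omega)
        omega
      rw [if_neg hqneg, hm, one_mul]
  simp only [hfd_p, hfd_q, e_pq]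
  rw [if_neg hm0]
  set q' := q / m with hq'def
  have hqe : m * q' = q := Int.mul_ediv_cancel' d2
  have hq'pos : 0 < q' := by
    have hq'ne : q' ≠ 0 := by
      intro h
      rw [h, mul_zero] at hqe
      exact hq hqe.symm
    rcases lt_trichotomy q 0 with hqs | hqs | hqs
    · have hmneg : m < 0 := by
        have hnp : ¬ 0 < m := fun h => absurd (hsign.mp h) (by omega)
        omega
      by_contra hc
      push_neg at hc
      have hq'neg : q' < 0 := by omega
      have := mul_pos_of_neg_of_neg hmneg hq'neg
      omega
    · exact absurd hqs hq
    · have hmpos : 0 < m := hsign.mpr hqs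
      by_contra hc
      push_neg at hc
      have hq'neg : q' < 0 := by omega
      have := mul_neg_of_pos_of_neg hmpos hq'neg
      omega
  have hq'le : ¬ q' ≤ 0 := by omega
  rw [if_neg hq'le]
  by_cases hpow : (2 : Int) ^ (Nat.log 2 q'.toNat) = q'
  · -- q' is a power of two: the closed form equals the loop
    have hB : q' = (1 : Int) <<< (PySem.Int.bitLength q' - 1) := (pow_check q' hq'pos).mp hpow
    rw [if_neg (not_not_intro hpow), if_neg (by push_neg; exact ⟨by omega, hB⟩)]
    have hk : q' = (2 : Int) ^ (PySem.Int.bitLength q' - 1) := by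
      rw [Int.shiftLeft_eq, one_mul] at hB
      exact hB
    have hbl1 : 1 ≤ PySem.Int.bitLength q' := bitLength_pos q' (by omega)
    have hcast : ((PySem.Int.bitLength q' - 1 : Nat) : Int) = (PySem.Int.bitLength q' : Int) - 1 := by
      omega
    conv_lhs => rw [hk]
    rw [loopA_closed, zero_add, hcast]
  · rw [if_pos hpow, if_pos (Or.inr (fun h => hpow ((pow_check q' hq'pos).mpr h)))]

-- ===== VERDICT (by name: the statement is the Claim_ definition above) =====
theorem func_spec : Claim_equal_func := by
  intro p q _ hpre
  unfold Spec_func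
  exact func_eq_alt p q hpre
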